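-- pv_equiv track=rewrite | github.com/dcialdella/adif-graficando-cositas | analizar_adi_grafico.py | analyze_time_distribution
-- ===== SOURCE A (Python) =====
-- from collections import defaultdict, Counter, OrderedDict
--
-- def analyze_time_distribution(qsos):
--     """
--     Analiza distribución horaria de QSOs en UTC.
--
--     Args:
--         qsos (list): Lista de diccionarios de QSOs
--
--     Returns:
--         dict: Diccionario con claves 0-23 representando cada hora UTC
--     """
--     hours = Counter()
--
--     for qso in qsos:
--         time_on = qso.get('TIME_ON', '')
--         if time_on and len(time_on) >= 2:
--             try:
--                 hour = int(time_on[:2])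
--                 hours[hour] += 1
--             except ValueError:
--                 continue
--
--     # Crear diccionario completo de 24 horas (incluye horas sin actividad)
--     sorted_hours = {hour: hours.get(hour, 0) for hour in range(24)}
--
--     return sorted_hours
-- ===== SOURCE B (Python) =====
-- def _hour_of(qso):
--     """Parsed UTC hour of a QSO, or None if TIME_ON is missing/short/unparsable."""
--     time_on = qso.get('TIME_ON', '')
--     if not time_on or len(time_on) < 2:
--         return None
--     try:
--         return int(time_on[:2])
--     except ValueError:
--         return None
--
--
-- def analyze_time_distribution(qsos):
--     return {h: sum(1 for qso in qsos if _hour_of(qso) == h) for h in range(24)}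
-- ===== Notes on version B (the rewrite author's own statement) =====
-- stated objective: alternative
-- what changed: Replaces the one-pass Counter accumulation with a per-hour scan: a helper extracts each QSO's parsed hour and the 24-key dict is built by counting, for each hour 0-23, the QSOs whose hour equals it.
import Mathlib
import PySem

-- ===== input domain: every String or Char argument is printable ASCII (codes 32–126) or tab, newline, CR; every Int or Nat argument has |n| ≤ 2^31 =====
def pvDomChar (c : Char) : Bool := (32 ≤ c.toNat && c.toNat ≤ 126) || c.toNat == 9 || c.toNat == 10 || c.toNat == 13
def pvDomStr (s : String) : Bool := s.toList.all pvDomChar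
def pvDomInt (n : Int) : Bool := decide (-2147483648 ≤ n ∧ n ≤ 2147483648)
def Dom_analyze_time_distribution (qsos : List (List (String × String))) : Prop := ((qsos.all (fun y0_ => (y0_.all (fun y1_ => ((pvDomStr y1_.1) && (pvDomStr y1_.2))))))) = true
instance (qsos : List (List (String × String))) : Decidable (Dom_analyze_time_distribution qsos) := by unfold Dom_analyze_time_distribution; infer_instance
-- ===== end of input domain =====

-- B builds the 24-key table by counting, per hour, the QSOs whose parsed hour matches it
-- (one scan per hour) instead of A's single-pass Counter accumulation; alternative, not faster.

-- ===== PORT A =====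
-- loop body of A's 'for qso in qsos' (Counter increment, ValueError skipped)
def pvStepA (hours : PySem.Dict Int Int) (qso : List (String × String)) : PySem.Dict Int Int :=
  let time_on := (PySem.Dict.mk qso).getD "TIME_ON" ""
  if time_on ≠ "" ∧ PySem.Str.len time_on ≥ 2 then
    match PySem.Int.ofStr? (PySem.Str.slice time_on none (some 2)) with
    | some hour => hours.modify hour 0 (· + 1)
    | none => hours
  else hours

def analyze_time_distribution (qsos : List (List (String × String))) : List (Int × Int) :=
  let hours : PySem.Dict Int Int := qsos.foldl pvStepA PySem.Dict.empty
  (PySem.List.pyRange 0 24 1).map (fun hour => (hour, hours.getD hour 0))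

-- ===== PORT B =====
-- _hour_of: parsed hour of a QSO, or none
def hour_of (qso : List (String × String)) : Option Int :=
  let time_on := (PySem.Dict.mk qso).getD "TIME_ON" ""
  if time_on = "" ∨ PySem.Str.len time_on < 2 then none
  else PySem.Int.ofStr? (PySem.Str.slice time_on none (some 2))

def analyze_time_distribution_alt (qsos : List (List (String × String))) : List (Int × Int) :=
  (PySem.List.pyRange 0 24 1).map (fun h =>
    (h, qsos.foldl (fun acc qso => if hour_of qso == some h then acc + 1 else acc) (0 : Int)))

-- ===== PRECONDITION & SPEC =====
def Spec_analyze_time_distribution (qsos : List (List (String × String))) (out : List (Int × Int)) : Prop := out = analyze_time_distribution_alt qsos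
instance (qsos : List (List (String × String))) (out : List (Int × Int)) : Decidable (Spec_analyze_time_distribution qsos out) := by unfold Spec_analyze_time_distribution; infer_instance

-- ===== CLAIM (what is proved, stated in full; the proofs are below) =====
def Claim_equal_analyze_time_distribution : Prop := ∀ (qsos : List (List (String × String))), Dom_analyze_time_distribution qsos → Spec_analyze_time_distribution qsos (analyze_time_distribution qsos)

-- ===== LEMMAS AND PROOFS =====

-- A's loop body, expressed through B's hour extractor
theorem pvStepA_eq (d : PySem.Dict Int Int) (q : List (String × String)) :
    pvStepA d q = (match hour_of q with
      | some hr => d.modify hr 0 (· + 1)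
      | none => d) := by
  unfold pvStepA hour_of
  by_cases h1 : (PySem.Dict.mk q).getD "TIME_ON" "" = "" ∨
      PySem.Str.len ((PySem.Dict.mk q).getD "TIME_ON" "") < 2
  · have : ¬ ((PySem.Dict.mk q).getD "TIME_ON" "" ≠ "" ∧
        PySem.Str.len ((PySem.Dict.mk q).getD "TIME_ON" "") ≥ 2) := by
      rcases h1 with h | h
      · exact fun hc => hc.1 h
      · exact fun hc => absurd hc.2 (by omega)
    simp only [if_neg this, if_pos h1]
  · have hP : (PySem.Dict.mk q).getD "TIME_ON" "" ≠ "" ∧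
        PySem.Str.len ((PySem.Dict.mk q).getD "TIME_ON" "") ≥ 2 := by
      rw [not_or] at h1; exact ⟨h1.1, by omega⟩
    simp only [if_pos hP, if_neg h1]

theorem counter_count (qsos : List (List (String × String))) :
    ∀ (d : PySem.Dict Int Int) (h : Int),
    (qsos.foldl pvStepA d).getD h 0
      = d.getD h 0 + (qsos.countP (fun q => hour_of q == some h) : Int) := by
  induction qsos with
  | nil => intro d h; simp
  | cons q qs ih =>
    intro d h
    simp only [List.foldl_cons, List.countP_cons, ih, pvStepA_eq]
    cases hq : hour_of q with
    | none => simp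
    | some hr =>
      by_cases hrh : hr = h
      · subst hrh
        simp [PySem.Dict.getD_modify_self]
        ring
      · simp [PySem.Dict.getD_modify_of_ne d 0 (· + 1) (Ne.symm hrh), hrh]

theorem foldl_cnt (qsos : List (List (String × String))) (h : Int) :
    ∀ (acc : Int),
    qsos.foldl (fun acc qso => if hour_of qso == some h then acc + 1 else acc) acc
      = acc + (qsos.countP (fun q => hour_of q == some h) : Int) := by
  induction qsos with
  | nil => intro acc; simp
  | cons q qs ih =>
    intro acc
    simp only [List.foldl_cons, List.countP_cons, ih]
    by_cases hq : hour_of q == some h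
    · simp [hq]; ring
    · simp [hq]

-- ===== VERDICT (by name: the statement is the Claim_ definition above) =====
theorem analyze_time_distribution_spec : Claim_equal_analyze_time_distribution := by
  intro qsos _
  unfold Spec_analyze_time_distribution analyze_time_distribution analyze_time_distribution_alt
  apply List.map_congr_left
  intro h _
  rw [counter_count, foldl_cnt]
  simp
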